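-- pv_equiv track=rewrite | github.com/Suhass27/The_JOY_COMPUTING_USING_PYTHON | week6/assignment2.py | solve
-- ===== SOURCE A (Python) =====
-- def solve(s):
--     ans=""
--     for i in range(len(s)):
--         letter = s[i]
--
--         if letter==" ":
--             ans+=" "
--         elif (letter.isupper()):
--             ans+=chr((ord(letter) -3 -65)%26 +65)
--         elif (letter.islower()):
--             ans+=chr((ord(letter)-2 -97)%26 +97)
--         else :
--             ans+=letter
--     return ans
-- ===== SOURCE B (Python) =====
-- def solve(s):
--     table = {}
--     for c in range(65, 91):
--         table[c] = chr((c - 3 - 65) % 26 + 65)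
--     for c in range(97, 123):
--         table[c] = chr((c - 2 - 97) % 26 + 97)
--     return s.translate(table)
-- ===== Notes on version B (the rewrite author's own statement) =====
-- stated objective: faster
-- what changed: Replaces the per-character branch-and-modular-arithmetic loop with a translation table built once over the 52 letter codes and a single s.translate call; non-letters are unmapped and pass through.
import Mathlib
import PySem

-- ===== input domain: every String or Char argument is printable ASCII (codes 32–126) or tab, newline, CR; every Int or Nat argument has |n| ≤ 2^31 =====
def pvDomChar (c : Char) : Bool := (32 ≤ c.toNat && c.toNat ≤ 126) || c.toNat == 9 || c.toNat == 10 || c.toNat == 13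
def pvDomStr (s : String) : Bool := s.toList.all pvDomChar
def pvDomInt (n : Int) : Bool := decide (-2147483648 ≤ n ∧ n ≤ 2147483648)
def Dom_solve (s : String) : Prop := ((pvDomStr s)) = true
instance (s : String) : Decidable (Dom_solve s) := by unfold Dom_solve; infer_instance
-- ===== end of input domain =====

-- B builds a translation table (dict over the 52 letter codes) once and translates the string
-- through it, instead of A's per-character branch-and-modular-arithmetic; constant-factor faster (one C-level translate pass).

-- ===== PORT A =====
-- letter.isupper() / letter.islower() ported as the ASCII range tests (exact on the printable-ASCII domain Dom_solve)
def solve (s : String) : String :=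
  String.mk (s.toList.foldl (fun ans letter =>
    if letter = ' ' then ans ++ [' ']
    else if 65 ≤ letter.toNat ∧ letter.toNat ≤ 90 then
      ans ++ [Char.ofNat (PySem.Int.mod ((letter.toNat : Int) - 3 - 65) 26 + 65).toNat]
    else if 97 ≤ letter.toNat ∧ letter.toNat ≤ 122 then
      ans ++ [Char.ofNat (PySem.Int.mod ((letter.toNat : Int) - 2 - 97) 26 + 97).toNat]
    else ans ++ [letter]) [])

-- ===== PORT B =====
-- the dict built by Source B's two range loops: code point (Int, as Python ord) ↦ replacement char
def pvTable : PySem.Dict Int Char :=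
  let t := (PySem.List.pyRange 65 91 1).foldl
    (fun d c => d.insert c (Char.ofNat (PySem.Int.mod (c - 3 - 65) 26 + 65).toNat)) PySem.Dict.empty
  (PySem.List.pyRange 97 123 1).foldl
    (fun d c => d.insert c (Char.ofNat (PySem.Int.mod (c - 2 - 97) 26 + 97).toNat)) t

-- s.translate(table): each char whose ordinal is a key is replaced, all others kept
def solve_alt (s : String) : String :=
  String.mk (s.toList.map (fun ch => (pvTable.get? (ch.toNat : Int)).getD ch))

-- ===== PRECONDITION & SPEC =====
def Spec_solve (s : String) (out : String) : Prop := out = solve_alt s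
instance (s : String) (out : String) : Decidable (Spec_solve s out) := by unfold Spec_solve; infer_instance

-- ===== CLAIM (what is proved, stated in full; the proofs are below) =====
def Claim_equal_solve : Prop := ∀ (s : String), Dom_solve s → Spec_solve s (solve s)

-- ===== LEMMAS AND PROOFS =====

-- A's per-character output, pulled out of the fold
def pvStepA (letter : Char) : Char :=
  if letter = ' ' then ' '
  else if 65 ≤ letter.toNat ∧ letter.toNat ≤ 90 then
    Char.ofNat (PySem.Int.mod ((letter.toNat : Int) - 3 - 65) 26 + 65).toNat
  else if 97 ≤ letter.toNat ∧ letter.toNat ≤ 122 then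
    Char.ofNat (PySem.Int.mod ((letter.toNat : Int) - 2 - 97) 26 + 97).toNat
  else letter

theorem pvStepA_eq (ans : List Char) (c : Char) :
    (if c = ' ' then ans ++ [' ']
    else if 65 ≤ c.toNat ∧ c.toNat ≤ 90 then
      ans ++ [Char.ofNat (PySem.Int.mod ((c.toNat : Int) - 3 - 65) 26 + 65).toNat]
    else if 97 ≤ c.toNat ∧ c.toNat ≤ 122 then
      ans ++ [Char.ofNat (PySem.Int.mod ((c.toNat : Int) - 2 - 97) 26 + 97).toNat]
    else ans ++ [c]) = ans ++ [pvStepA c] := by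
  unfold pvStepA; split_ifs <;> rfl

set_option maxRecDepth 8192 in
theorem pvStep_agree_ofNat : ∀ n < 127,
    pvStepA (Char.ofNat n) = ((pvTable.get? ((Char.ofNat n).toNat : Int)).getD (Char.ofNat n)) := by
  decide

theorem pvStep_agree (c : Char) (h : pvDomChar c = true) :
    pvStepA c = (pvTable.get? (c.toNat : Int)).getD c := by
  have hle : c.toNat < 127 := by
    simp [pvDomChar] at h; omega
  have hc : Char.ofNat c.toNat = c := Char.ofNat_toNat c
  have := pvStep_agree_ofNat c.toNat hle
  rwa [hc] at this

theorem solve_spec : Claim_equal_solve := by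
  intro s hdom
  unfold Spec_solve solve solve_alt
  have hall : ∀ c ∈ s.toList, pvDomChar c = true := by
    simpa [Dom_solve, pvDomStr, List.all_eq_true] using hdom
  congr 1
  have hfun : (fun (ans : List Char) (letter : Char) =>
      if letter = ' ' then ans ++ [' ']
      else if 65 ≤ letter.toNat ∧ letter.toNat ≤ 90 then
        ans ++ [Char.ofNat (PySem.Int.mod ((letter.toNat : Int) - 3 - 65) 26 + 65).toNat]
      else if 97 ≤ letter.toNat ∧ letter.toNat ≤ 122 then
        ans ++ [Char.ofNat (PySem.Int.mod ((letter.toNat : Int) - 2 - 97) 26 + 97).toNat]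
      else ans ++ [letter]) = fun ans letter => ans ++ [pvStepA letter] := by
    funext ans c; exact pvStepA_eq ans c
  rw [hfun, PySem.List.foldl_append_singleton_eq_map, List.nil_append]
  exact List.map_congr_left fun c hc => pvStep_agree c (hall c hc)
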